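-- pv_equiv track=rewrite | github.com/soft-rain/EPPER | [중] BOJ13305_주유소.py | solution
-- ===== SOURCE A (Python) =====
-- def solution(N, d, p):
--     cost = 0  # 총 주유 가격
--     min_cost = p[0]  # 처음은 무조건 주유해야 함
--     for i in range(N - 1):
--         if p[i] < min_cost:  # 지금 도시의 가격이 더 싸면 최소 주유비용 업데이트함
--             min_cost = p[i]
--         cost += min_cost * d[i]  # 다음 도시까지의 거리 * 주유비용
--     return cost
-- ===== SOURCE B (Python) =====
-- def solution(N, d, p):
--     # Segment-based greedy: precompute prefix sums of distances, then charge each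
--     # record-minimum price for the whole stretch of road it covers.
--     n = max(N - 1, 0)
--     D = [0]                      # D[i] = d[0] + ... + d[i-1]
--     for i in range(n):
--         D.append(D[-1] + d[i])
--     total = 0
--     best = p[0]                  # fuel must be bought at the first city
--     start = 0
--     for i in range(n):
--         if p[i] < best:          # a cheaper station: close the previous segment
--             total += best * (D[i] - D[start])
--             best = p[i]
--             start = i
--     return total + best * (D[n] - D[start])
-- ===== Notes on version B (the rewrite author's own statement) =====
-- stated objective: alternative
-- what changed: Replaces A's per-road running-minimum accumulation by precomputing a prefix-sum table of distances and then scanning for record-minimum prices, charging each record price once for its whole segment of road via subtracted prefix sums.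
import Mathlib
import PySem

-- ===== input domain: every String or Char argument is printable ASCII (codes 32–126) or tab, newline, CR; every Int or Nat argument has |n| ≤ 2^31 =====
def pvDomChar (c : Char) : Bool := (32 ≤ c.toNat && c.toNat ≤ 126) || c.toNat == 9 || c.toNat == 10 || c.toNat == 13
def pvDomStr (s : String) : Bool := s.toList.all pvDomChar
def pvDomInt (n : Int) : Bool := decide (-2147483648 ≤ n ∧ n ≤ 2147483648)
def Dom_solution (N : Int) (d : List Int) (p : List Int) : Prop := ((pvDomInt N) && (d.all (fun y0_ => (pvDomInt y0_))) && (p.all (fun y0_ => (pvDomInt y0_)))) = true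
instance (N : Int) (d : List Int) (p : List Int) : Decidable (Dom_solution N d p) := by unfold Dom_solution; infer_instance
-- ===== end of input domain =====

-- B replaces A's per-road running-minimum accumulation by a prefix-sum table of
-- distances plus a segment scan that charges each record-minimum price once for
-- its whole stretch (objective: alternative decomposition, same O(n) cost).

-- ===== PORT A =====
-- loop body of A: update the running minimum, then pay min_cost * d[i]
def stepA (d p : List Int) (s : Int × Int) (i : Int) : Int × Int :=
  let m := if PySem.List.pyGetD p i 0 < s.2 then PySem.List.pyGetD p i 0 else s.2
  (s.1 + m * PySem.List.pyGetD d i 0, m)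

def solution (N : Int) (d : List Int) (p : List Int) : Int :=
  ((PySem.List.pyRange 0 (N - 1) 1).foldl (stepA d p)
    (0, PySem.List.pyGetD p 0 0)).1

-- ===== PORT B =====
-- D[i] = d[0] + ... + d[i-1]  (Source B's first loop: D.append(D[-1] + d[i]))
def buildD (d : List Int) (n : Int) : List Int :=
  (PySem.List.pyRange 0 n 1).foldl
    (fun D i => D ++ [PySem.List.pyGetD D (-1) 0 + PySem.List.pyGetD d i 0]) [0]

-- loop body of Source B's second loop: state = (total, best, start)
def stepB (p D : List Int) (s : Int × Int × Int) (i : Int) : Int × Int × Int :=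
  if PySem.List.pyGetD p i 0 < s.2.1 then
    (s.1 + s.2.1 * (PySem.List.pyGetD D i 0 - PySem.List.pyGetD D s.2.2 0),
      PySem.List.pyGetD p i 0, i)
  else s

def solution_alt (N : Int) (d : List Int) (p : List Int) : Int :=
  let n : Int := max (N - 1) 0
  let D := buildD d n
  let s := (PySem.List.pyRange 0 n 1).foldl (stepB p D)
    (0, PySem.List.pyGetD p 0 0, 0)
  s.1 + s.2.1 * (PySem.List.pyGetD D n 0 - PySem.List.pyGetD D s.2.2 0)

-- ===== PRECONDITION & SPEC =====
-- Pre_ excludes exactly the inputs on which A raises IndexError: empty p (p[0])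
-- or N - 1 exceeding the length of d or p (d[i] / p[i] inside the loop).
def Pre_solution (N : Int) (d : List Int) (p : List Int) : Prop :=
  p ≠ [] ∧ N - 1 ≤ (d.length : Int) ∧ N - 1 ≤ (p.length : Int)
instance (N : Int) (d : List Int) (p : List Int) : Decidable (Pre_solution N d p) := by unfold Pre_solution; infer_instance

def pvWitness_solution : Int × List Int × List Int := (4, [2, 3, 1], [5, 2, 4, 1])

def Spec_solution (N : Int) (d : List Int) (p : List Int) (out : Int) : Prop := out = solution_alt N d p
instance (N : Int) (d : List Int) (p : List Int) (out : Int) : Decidable (Spec_solution N d p out) := by unfold Spec_solution; infer_instance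

-- ===== CLAIM (what is proved, stated in full; the proofs are below) =====
def Claim_equal_solution : Prop := ∀ (N : Int) (d : List Int) (p : List Int), Dom_solution N d p → Pre_solution N d p → Spec_solution N d p (solution N d p)

-- ===== LEMMAS AND PROOFS =====

-- prefix sum of the first j distances (with Python's in-range reads as getD)
def psum (d : List Int) (j : Nat) : Int :=
  ((List.range j).map (fun i => d.getD i 0)).sum

theorem psum_succ (d : List Int) (j : Nat) :
    psum d (j + 1) = psum d j + d.getD j 0 := by
  simp [psum, List.range_succ]

theorem buildD_eq (d : List Int) (n : Nat) :
    buildD d (n : Int) = (List.range (n + 1)).map (psum d) := by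
  induction n with
  | zero => simp [buildD, PySem.List.pyRange_one_eq_nil, psum]
  | succ n ih =>
    unfold buildD at ih ⊢
    rw [show ((n + 1 : Nat) : Int) = (n : Int) + 1 by push_cast; ring,
      PySem.List.pyRange_one_succ_right (by positivity), List.foldl_append, ih]
    simp only [List.foldl_cons, List.foldl_nil]
    rw [show (List.range (n + 1)).map (psum d) =
        (List.range n).map (psum d) ++ [psum d n] by simp [List.range_succ]]
    rw [PySem.List.pyGetD_neg_one_append_singleton, PySem.List.pyGetD_natCast]
    simp [List.range_succ, psum_succ]

theorem buildD_get (d : List Int) (n j : Nat) (h : j ≤ n) :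
    PySem.List.pyGetD (buildD d (n : Int)) (j : Int) 0 = psum d j := by
  rw [buildD_eq, PySem.List.pyGetD_natCast,
    PySem.List.getD_map_range (psum d) (n + 1) j 0 (by omega)]

theorem inv (d p : List Int) (n k : Nat) (hk : k ≤ n) :
    (((List.range k).map (fun (j : Nat) => (j : Int))).foldl (stepA d p)
        (0, PySem.List.pyGetD p 0 0)).2 =
      (((List.range k).map (fun (j : Nat) => (j : Int))).foldl (stepB p (buildD d (n : Int)))
        (0, PySem.List.pyGetD p 0 0, 0)).2.1 ∧
    ∃ s : Nat,
      (((List.range k).map (fun (j : Nat) => (j : Int))).foldl (stepB p (buildD d (n : Int)))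
        (0, PySem.List.pyGetD p 0 0, 0)).2.2 = (s : Int) ∧ s ≤ k ∧
      (((List.range k).map (fun (j : Nat) => (j : Int))).foldl (stepA d p)
        (0, PySem.List.pyGetD p 0 0)).1 =
      (((List.range k).map (fun (j : Nat) => (j : Int))).foldl (stepB p (buildD d (n : Int)))
        (0, PySem.List.pyGetD p 0 0, 0)).1 +
      (((List.range k).map (fun (j : Nat) => (j : Int))).foldl (stepB p (buildD d (n : Int)))
        (0, PySem.List.pyGetD p 0 0, 0)).2.1 *
        (psum d k - psum d (((List.range k).map (fun (j : Nat) => (j : Int))).foldl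
          (stepB p (buildD d (n : Int))) (0, PySem.List.pyGetD p 0 0, 0)).2.2.toNat) := by
  induction k with
  | zero => exact ⟨rfl, 0, rfl, le_refl _, by simp⟩
  | succ k ih =>
    obtain ⟨hm, s, hs, hsk, hc⟩ := ih (by omega)
    set A := ((List.range k).map (fun (j : Nat) => (j : Int))).foldl (stepA d p)
      (0, PySem.List.pyGetD p 0 0) with hA
    set B := ((List.range k).map (fun (j : Nat) => (j : Int))).foldl (stepB p (buildD d (n : Int)))
      (0, PySem.List.pyGetD p 0 0, 0) with hB
    rw [List.range_succ, List.map_append, List.foldl_append, List.foldl_append, ← hA, ← hB]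
    simp only [List.map_cons, List.map_nil, List.foldl_cons, List.foldl_nil]
    simp only [stepA, stepB]
    rw [PySem.List.pyGetD_natCast p k 0, PySem.List.pyGetD_natCast d k 0, hs,
      buildD_get d n k (by omega), buildD_get d n s (by omega)]
    by_cases hlt : p.getD k 0 < B.2.1
    · rw [if_pos (by rw [hm]; exact hlt), if_pos hlt]
      refine ⟨rfl, k, rfl, by omega, ?_⟩
      simp only [Int.toNat_natCast]
      rw [hc, hs, Int.toNat_natCast, psum_succ]
      ring
    · rw [if_neg (by rw [hm]; exact hlt), if_neg hlt]
      refine ⟨hm, s, hs, by omega, ?_⟩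
      rw [hc, hm, hs, Int.toNat_natCast, psum_succ]
      ring

-- ===== VERDICT (by name: the statement is the Claim_ definition above) =====
theorem solution_spec : Claim_equal_solution := by
  intro N d p _hdom _hpre
  unfold Spec_solution solution solution_alt
  have hrange : PySem.List.pyRange 0 (N - 1) 1 = PySem.List.pyRange 0 (max (N - 1) 0) 1 := by
    by_cases h : N - 1 ≤ 0
    · rw [PySem.List.pyRange_one_eq_nil h, PySem.List.pyRange_one_eq_nil (by omega)]
    · rw [max_eq_left (by omega)]
  set n : Int := max (N - 1) 0 with hn
  have hnn : n = ((n.toNat : Nat) : Int) := by omega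
  simp only []
  rw [hrange, hnn, PySem.List.pyRange_zero_nat]
  obtain ⟨_, s, hs, hsk, hc⟩ := inv d p n.toNat n.toNat (le_refl _)
  rw [hc, hs, Int.toNat_natCast,
    buildD_get d n.toNat n.toNat (le_refl _), buildD_get d n.toNat s hsk]
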